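-- pv_equiv track=rewrite | github.com/B1h14/2048-agent | src/MCTS_Policy_gradient.py | monotomy
-- ===== SOURCE A (Python) =====
-- def monotomy (board):
--     distance = 0
--     consecutives = True
--     for k in range(len(board)**2-1):
--         i = k//len(board)
--         j = k%len(board)
--         j = j*(i%2) + (len(board)-1-j)*(1 - i%2)
--         l = (k+1)//len(board)
--         m = (k+1)%len(board)
--         m = m*(l%2) + (len(board)-1-m)*(1 - l%2)
--         if ( board[i][j] > board[l][m]) and consecutives:
--             distance += 1
--         else:
--             consecutives = False
--             break
--     return  distance
-- ===== SOURCE B (Python) =====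
-- def monotomy(board):
--     n = len(board)
--     seq = []
--     for i, row in enumerate(board):
--         part = [row[j] for j in range(n)]
--         seq += part if i % 2 else part[::-1]
--     run = 0
--     for idx in range(len(seq) - 2, -1, -1):
--         run = run + 1 if seq[idx] > seq[idx + 1] else 0
--     return run
-- ===== Notes on version B (the rewrite author's own statement) =====
-- stated objective: alternative
-- what changed: Replaces A's single lazy flat-index loop (//, %, parity arithmetic, dead consecutives flag, early break) by two staged passes: eagerly materialize the snake-order sequence row by row, then a backward fold over it that maintains the length of the decreasing run starting at each position (reset to 0 on a violation), whose final value at position 0 is the answer; no early exit.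
-- outside the precondition, e.g. on monotomy([[5, 1], [2]]): A returns 0, B raises IndexError; on monotomy([[]]): A returns 0, B raises IndexError
import Mathlib
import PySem

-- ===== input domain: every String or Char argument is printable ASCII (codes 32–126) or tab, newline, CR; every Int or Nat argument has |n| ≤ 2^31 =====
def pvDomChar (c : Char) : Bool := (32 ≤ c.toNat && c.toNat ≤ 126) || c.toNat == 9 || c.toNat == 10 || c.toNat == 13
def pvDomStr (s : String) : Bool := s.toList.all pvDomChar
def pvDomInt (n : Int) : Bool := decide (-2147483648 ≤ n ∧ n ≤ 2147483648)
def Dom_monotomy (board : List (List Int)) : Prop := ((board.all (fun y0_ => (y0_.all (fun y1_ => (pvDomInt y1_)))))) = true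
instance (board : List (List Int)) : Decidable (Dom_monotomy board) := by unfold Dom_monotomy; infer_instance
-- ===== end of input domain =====

-- B replaces A's lazy flat-index loop (//, %, parity arithmetic, dead flag,
-- early break) by two staged passes: eagerly materialize the snake-order
-- sequence, then a backward fold maintaining the decreasing-run length at each
-- position; alternative decomposition, same cost.

-- ===== PORT A =====
-- literal port of A's `for k in range(len(board)**2-1)` loop with early break;
-- indexing board[i][j] is ported with pyGetD (exact under Pre_, which puts every
-- accessed index in range)
def monotomyLoop (board : List (List Int)) (ks : List Int) (distance : Int)
    (consecutives : Bool) : Int :=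
  match ks with
  | [] => distance
  | k :: rest =>
    let n : Int := (board.length : Int)
    let i := PySem.Int.floordiv k n
    let j0 := PySem.Int.mod k n
    let j := j0 * (PySem.Int.mod i 2) + (n - 1 - j0) * (1 - PySem.Int.mod i 2)
    let l := PySem.Int.floordiv (k + 1) n
    let m0 := PySem.Int.mod (k + 1) n
    let m := m0 * (PySem.Int.mod l 2) + (n - 1 - m0) * (1 - PySem.Int.mod l 2)
    if (PySem.List.pyGetD (PySem.List.pyGetD board i []) j 0 >
          PySem.List.pyGetD (PySem.List.pyGetD board l []) m 0) ∧ consecutives = true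
    then monotomyLoop board rest (distance + 1) consecutives
    else distance

def monotomy (board : List (List Int)) : Int :=
  monotomyLoop board (PySem.List.pyRange 0 ((board.length : Int) ^ 2 - 1) 1) 0 true

-- ===== PORT B =====
-- pass 1 of Source B: seq built row by row, `part = [row[j] for j in range(n)]`,
-- appended as-is for odd rows and reversed for even rows
def snakeSeq (board : List (List Int)) : List Int :=
  (PySem.List.enumerate board).flatMap (fun p =>
    let part := (PySem.List.pyRange 0 (board.length : Int) 1).map
      (fun j => PySem.List.pyGetD p.2 j 0)
    if PySem.Int.mod p.1 2 = 1 then part else part.reverse)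

-- pass 2 of Source B: `for idx in range(len(seq)-2, -1, -1)` updating `run`
def runLoop (seq : List Int) (idxs : List Int) (run : Int) : Int :=
  match idxs with
  | [] => run
  | idx :: rest =>
    runLoop seq rest
      (if PySem.List.pyGetD seq idx 0 > PySem.List.pyGetD seq (idx + 1) 0
       then run + 1 else 0)

def monotomy_alt (board : List (List Int)) : Int :=
  let seq := snakeSeq board
  runLoop seq (PySem.List.pyRange ((seq.length : Int) - 2) (-1) (-1)) 0

-- ===== PRECONDITION & SPEC =====
-- Pre_ excludes ragged boards having a row shorter than the number of rows: on
-- those A either raises IndexError or returns only by an accident of where its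
-- early break falls, while B, which materializes the whole snake sequence
-- first, raises IndexError on every such board.
def Pre_monotomy (board : List (List Int)) : Prop :=
  ∀ row ∈ board, board.length ≤ row.length
instance (board : List (List Int)) : Decidable (Pre_monotomy board) := by
  unfold Pre_monotomy; infer_instance
def pvWitness_monotomy : List (List Int) := [[3, 4], [2, 1]]

def Spec_monotomy (board : List (List Int)) (out : Int) : Prop := out = monotomy_alt board
instance (board : List (List Int)) (out : Int) : Decidable (Spec_monotomy board out) := by
  unfold Spec_monotomy; infer_instance

-- ===== CLAIM (what is proved, stated in full; the proofs are below) =====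
def Claim_equal_monotomy : Prop :=
  ∀ (board : List (List Int)), Dom_monotomy board → Pre_monotomy board →
    Spec_monotomy board (monotomy board)

-- ===== LEMMAS AND PROOFS =====

-- the value A reads at snake position k
def pvCell (board : List (List Int)) (k : Int) : Int :=
  let n : Int := (board.length : Int)
  let i := PySem.Int.floordiv k n
  let j0 := PySem.Int.mod k n
  let j := j0 * (PySem.Int.mod i 2) + (n - 1 - j0) * (1 - PySem.Int.mod i 2)
  PySem.List.pyGetD (PySem.List.pyGetD board i []) j 0

-- length of the strictly decreasing prefix of adjacent steps: the common
-- characterisation both ports are reduced to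
def descPrefix : List Int → Int
  | a :: b :: rest => if a > b then 1 + descPrefix (b :: rest) else 0
  | _ => 0

theorem monotomyLoop_cons (board : List (List Int)) (k : Int) (rest : List Int) (d : Int) :
    monotomyLoop board (k :: rest) d true =
      if pvCell board k > pvCell board (k + 1) then monotomyLoop board rest (d + 1) true
      else d := by
  simp [monotomyLoop, pvCell]

theorem monotomyLoop_shift (board : List (List Int)) (ks : List Int) (d : Int) :
    monotomyLoop board ks d true = d + monotomyLoop board ks 0 true := by
  induction ks generalizing d with
  | nil => simp [monotomyLoop]
  | cons k rest ih =>
    rw [monotomyLoop_cons, monotomyLoop_cons]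
    split_ifs with h
    · rw [ih (d + 1), ih (0 + 1)]; ring
    · omega

theorem descPrefix_short (xs : List Int) (h : xs.length ≤ 1) : descPrefix xs = 0 := by
  match xs with
  | [] => rfl
  | [a] => rfl
  | a :: b :: rest => simp at h

theorem monotomyLoop_eq_descPrefix (board : List (List Int)) :
    ∀ (c : Nat) (a b : Int), (b - 1 - a).toNat = c →
      monotomyLoop board (PySem.List.pyRange a (b - 1) 1) 0 true =
        descPrefix ((PySem.List.pyRange a b 1).map (pvCell board)) := by
  intro c
  induction c with
  | zero =>
    intro a b hc
    have hba : b - 1 ≤ a := by omega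
    rw [PySem.List.pyRange_one_eq_nil hba]
    have : descPrefix ((PySem.List.pyRange a b 1).map (pvCell board)) = 0 := by
      apply descPrefix_short
      simp [PySem.List.pyRange_one a b]
      omega
    simp [monotomyLoop, this]
  | succ c ih =>
    intro a b hc
    have hab : a < b - 1 := by omega
    rw [PySem.List.pyRange_one_cons hab]
    rw [PySem.List.pyRange_one_cons (show a < b by omega),
        PySem.List.pyRange_one_cons (show a + 1 < b by omega)]
    rw [monotomyLoop_cons]
    simp only [List.map_cons]
    rw [show descPrefix (pvCell board a :: pvCell board (a + 1) ::
          (PySem.List.pyRange (a + 1 + 1) b 1).map (pvCell board)) =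
        if pvCell board a > pvCell board (a + 1) then
          1 + descPrefix (pvCell board (a + 1) ::
            (PySem.List.pyRange (a + 1 + 1) b 1).map (pvCell board))
        else 0 from rfl]
    split_ifs with h
    · rw [monotomyLoop_shift]
      rw [ih (a + 1) b (by omega)]
      rw [PySem.List.pyRange_one_cons (show a + 1 < b by omega)]
      simp
    · rfl

-- one row's contribution of B equals the corresponding block of snake cells
theorem block_eq (board pre suf : List (List Int)) (row : List Int)
    (hb : board = pre ++ row :: suf) :
    ((if PySem.Int.mod (pre.length : Int) 2 = 1 then
        PySem.List.pyRange 0 (board.length : Int) 1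
      else (PySem.List.pyRange 0 (board.length : Int) 1).reverse).map
        (fun j => PySem.List.pyGetD row j 0))
    = (PySem.List.pyRange ((pre.length : Int) * (board.length : Int))
        ((pre.length : Int) * (board.length : Int) + (board.length : Int)) 1).map
        (pvCell board) := by
  set n : Nat := board.length with hn
  set t : Nat := pre.length with ht
  have hnpos : 0 < n := by
    rw [hn, hb]; simp only [List.length_append, List.length_cons]; omega
  have htn : t < n := by
    rw [ht, hn, hb]; simp only [List.length_append, List.length_cons]; omega
  have hrange : PySem.List.pyRange ((t : Int) * n) ((t : Int) * n + n) 1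
      = (List.range n).map (fun (q : Nat) => (t : Int) * n + (q : Int)) := by
    have h0 : ((t : Int) * n + n - (t : Int) * n).toNat = n := by omega
    rw [PySem.List.pyRange_one, h0]
  have hrowlookup : PySem.List.pyGetD board (t : Int) [] = row := by
    rw [PySem.List.pyGetD_natCast]
    rw [hb, ht]
    simp [List.getD]
  have hcell : ∀ q : Nat, q < n → pvCell board ((t : Int) * n + (q : Int)) =
      PySem.List.pyGetD row
        ((q : Int) * (PySem.Int.mod (t : Int) 2) +
          ((n : Int) - 1 - q) * (1 - PySem.Int.mod (t : Int) 2)) 0 := by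
    intro q hq
    have hfd : PySem.Int.floordiv ((t : Int) * n + q) (n : Int) = (t : Int) := by
      rw [PySem.Int.floordiv_eq_iff_of_pos (by exact_mod_cast hnpos)]
      constructor <;> [omega; nlinarith [Int.natCast_nonneg q, Int.natCast_nonneg t]]
    have hmod : PySem.Int.mod ((t : Int) * n + q) (n : Int) = (q : Int) := by
      have := PySem.Int.floordiv_mul_add_mod ((t : Int) * n + q) (n : Int)
      rw [hfd] at this; omega
    simp only [pvCell, ← hn]
    rw [hfd, hmod, hrowlookup]
  rw [hrange, List.map_map]
  rcases Nat.mod_two_eq_zero_or_one t with hpar | hpar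
  · have hm2 : PySem.Int.mod (t : Int) 2 = 0 := by
      have := PySem.Int.mod_natCast t 2; rw [hpar] at this; exact_mod_cast this
    rw [if_neg (by rw [hm2]; norm_num)]
    have hrev : (PySem.List.pyRange 0 (n : Int) 1).reverse
        = (List.range n).map (fun (q : Nat) => (n : Int) - 1 - (q : Int)) := by
      have h1 := PySem.List.pyRange_neg_one_eq_reverse ((n : Int) - 1) (-1)
      have h2 := PySem.List.pyRange_neg_one ((n : Int) - 1) (-1)
      rw [show (-1 : Int) + 1 = 0 by ring, show (n : Int) - 1 + 1 = (n : Int) by ring] at h1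
      rw [← h1, h2]
      have h0 : ((n : Int) - 1 - -1).toNat = n := by omega
      rw [h0]
    rw [hrev, List.map_map]
    apply List.map_congr_left
    intro q hq
    simp only [Function.comp_apply]
    rw [hcell q (List.mem_range.mp hq), hm2]
    congr 1
    ring
  · have hm2 : PySem.Int.mod (t : Int) 2 = 1 := by
      have := PySem.Int.mod_natCast t 2; rw [hpar] at this; exact_mod_cast this
    rw [if_pos hm2]
    rw [PySem.List.pyRange_one]
    have h0 : ((n : Int) - 0).toNat = n := by omega
    rw [h0, List.map_map]
    apply List.map_congr_left
    intro q hq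
    simp only [Function.comp_apply]
    rw [hcell q (List.mem_range.mp hq), hm2]
    congr 1
    ring

theorem snake_suffix (board : List (List Int)) :
    ∀ (suf pre : List (List Int)), board = pre ++ suf →
      (PySem.List.enumerate suf (pre.length : Int)).flatMap (fun p =>
        ((if PySem.Int.mod p.1 2 = 1 then PySem.List.pyRange 0 (board.length : Int) 1
          else (PySem.List.pyRange 0 (board.length : Int) 1).reverse).map
            (fun j => PySem.List.pyGetD p.2 j 0)))
      = (PySem.List.pyRange ((pre.length : Int) * (board.length : Int))
          ((board.length : Int) * (board.length : Int)) 1).map (pvCell board) := by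
  intro suf
  induction suf with
  | nil =>
    intro pre hb
    have : (pre.length : Int) = (board.length : Int) := by rw [hb]; simp
    rw [this, PySem.List.pyRange_one_eq_nil (le_refl _)]
    simp [PySem.List.enumerate]
  | cons row suf' ih =>
    intro pre hb
    rw [PySem.List.enumerate_cons]
    rw [List.flatMap_cons]
    have hlen : (pre.length : Int) + 1 = ((pre ++ [row]).length : Int) := by simp
    have htn : pre.length < board.length := by rw [hb]; simp
    have hsplit : PySem.List.pyRange ((pre.length : Int) * (board.length : Int))
        ((board.length : Int) * (board.length : Int)) 1
      = PySem.List.pyRange ((pre.length : Int) * (board.length : Int))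
          ((pre.length : Int) * (board.length : Int) + (board.length : Int)) 1
        ++ PySem.List.pyRange ((pre.length : Int) * (board.length : Int) + (board.length : Int))
          ((board.length : Int) * (board.length : Int)) 1 := by
      apply PySem.List.pyRange_one_append
      · simp
      · nlinarith [Int.natCast_nonneg board.length,
          (show (pre.length : Int) + 1 ≤ (board.length : Int) by exact_mod_cast htn)]
    rw [hsplit, List.map_append]
    congr 1
    · exact block_eq board pre suf' row hb
    · have hb' : board = (pre ++ [row]) ++ suf' := by rw [hb]; simp
      have harg : (((pre ++ [row]).length : Int)) * (board.length : Int)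
          = (pre.length : Int) * (board.length : Int) + (board.length : Int) := by
        simp only [List.length_append, List.length_cons, List.length_nil]; push_cast; ring
      rw [hlen, ih (pre ++ [row]) hb', harg]

-- B's eagerly built sequence is exactly A's snake cells in order
theorem snakeSeq_eq_cells (board : List (List Int)) :
    snakeSeq board
      = (PySem.List.pyRange 0 ((board.length : Int) * (board.length : Int)) 1).map
          (pvCell board) := by
  have hbody : (fun (p : Int × List Int) =>
      let part := (PySem.List.pyRange 0 (board.length : Int) 1).map
        (fun j => PySem.List.pyGetD p.2 j 0)
      if PySem.Int.mod p.1 2 = 1 then part else part.reverse)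
    = (fun (p : Int × List Int) =>
      ((if PySem.Int.mod p.1 2 = 1 then PySem.List.pyRange 0 (board.length : Int) 1
        else (PySem.List.pyRange 0 (board.length : Int) 1).reverse).map
          (fun j => PySem.List.pyGetD p.2 j 0))) := by
    funext p
    dsimp only
    split_ifs with h
    · rfl
    · exact List.map_reverse.symm
  have := snake_suffix board board [] rfl
  unfold snakeSeq
  rw [hbody]
  simpa using this

-- backward-fold invariant: entering index k-1 with run = dec-run at k gives descPrefix
theorem runLoop_desc (xs : List Int) :
    ∀ (k : Nat), k < xs.length →
      runLoop xs (PySem.List.pyRange ((k : Int) - 1) (-1) (-1)) (descPrefix (xs.drop k))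
        = descPrefix xs := by
  intro k
  induction k with
  | zero =>
    intro _
    rw [show ((0 : Nat) : Int) - 1 = -1 by norm_num,
        PySem.List.pyRange_neg_one_eq_nil (le_refl _)]
    simp [runLoop]
  | succ k ih =>
    intro hk
    have hk' : k < xs.length := by omega
    rw [show ((k + 1 : Nat) : Int) - 1 = (k : Int) by push_cast; ring,
        PySem.List.pyRange_neg_one_cons (by omega)]
    have e1 : xs.drop k = xs[k] :: xs.drop (k + 1) := by
      rw [List.drop_eq_getElem_cons hk']
    have e2 : xs.drop (k + 1) = xs[k + 1] :: xs.drop (k + 2) := by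
      rw [List.drop_eq_getElem_cons hk]
    have hstate : (if PySem.List.pyGetD xs ((k : Int)) 0 >
          PySem.List.pyGetD xs ((k : Int) + 1) 0
        then descPrefix (xs.drop (k + 1)) + 1 else 0) = descPrefix (xs.drop k) := by
      rw [show ((k : Int)) + 1 = ((k + 1 : Nat) : Int) by push_cast; ring,
          PySem.List.pyGetD_natCast, PySem.List.pyGetD_natCast,
          List.getD_eq_getElem _ _ hk', List.getD_eq_getElem _ _ hk, e1, e2]
      simp only [descPrefix]
      split_ifs with h
      · rw [← e2]; omega
      · rfl
    simp only [runLoop]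
    rw [hstate]
    exact ih hk'

theorem runLoop_main (xs : List Int) :
    runLoop xs (PySem.List.pyRange ((xs.length : Int) - 2) (-1) (-1)) 0 = descPrefix xs := by
  rcases Nat.eq_zero_or_pos xs.length with h | h
  · have hnil : xs = [] := List.eq_nil_of_length_eq_zero h
    rw [hnil]
    rw [show (([] : List Int).length : Int) - 2 = -2 by norm_num,
        PySem.List.pyRange_neg_one_eq_nil (by norm_num)]
    rfl
  · have hk : xs.length - 1 < xs.length := by omega
    have h0 : descPrefix (xs.drop (xs.length - 1)) = 0 := by
      apply descPrefix_short
      simp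
      omega
    have hcast : ((xs.length - 1 : Nat) : Int) - 1 = (xs.length : Int) - 2 := by omega
    have := runLoop_desc xs (xs.length - 1) hk
    rw [h0, hcast] at this
    exact this

-- ===== VERDICT (by name: the statement is the Claim_ definition above) =====
theorem monotomy_spec : Claim_equal_monotomy := by
  intro board _ _
  unfold Spec_monotomy monotomy monotomy_alt
  rw [runLoop_main, snakeSeq_eq_cells]
  have h := monotomyLoop_eq_descPrefix board
    (((board.length : Int) * (board.length : Int)) - 1 - 0).toNat 0
    ((board.length : Int) * (board.length : Int)) rfl
  rw [show ((board.length : Int)) ^ 2 = (board.length : Int) * (board.length : Int) by ring]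
  exact h
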